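-- pv_equiv track=rewrite | github.com/IonutLucianB/adr-webapp | model.py | rebuild_sentence
-- ===== SOURCE A (Python) =====
-- letters = [' ','-','a','b','c','d','e','f','g','h','i','j','k','l',
-- 'm','n','o','p','q','r','s','t','u','v','w','x','y','z']
--
-- of_interest = ['a', 'i', 's', 't']
--
-- def rebuild_sentence(sentence_in, sentence_out):
--     index_out = 0
--     sentence_rebuilt = ""
--     len_out = len(sentence_out)
--     for i in range(len(sentence_in)):
--         char_crt = sentence_in[i]
--         if char_crt.lower() in letters:
--             if len_out > index_out:
--                 if char_crt in of_interest:
--                     if char_crt.isupper():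
--                         sentence_rebuilt += sentence_out[index_out].upper()
--                     else:
--                         sentence_rebuilt += sentence_out[index_out]
--                 else:
--                     sentence_rebuilt += char_crt
--                 index_out += 1
--             else:
--                 sentence_rebuilt += char_crt
--         else:
--             sentence_rebuilt += char_crt
--     return sentence_rebuilt
-- ===== SOURCE B (Python) =====
-- letters = [' ','-','a','b','c','d','e','f','g','h','i','j','k','l',
-- 'm','n','o','p','q','r','s','t','u','v','w','x','y','z']
--
-- of_interest = ['a', 'i', 's', 't']
--
-- def rebuild_sentence(sentence_in, sentence_out):
--     # Positions that consume an output slot: chars whose lowercase form is in `letters`.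
--     letter_positions = [i for i, c in enumerate(sentence_in) if c.lower() in letters]
--     chars = list(sentence_in)
--     # zip truncates at len(sentence_out), matching A's running index guard.
--     for pos, out_c in zip(letter_positions, sentence_out):
--         if chars[pos] in of_interest:
--             chars[pos] = out_c
--     return ''.join(chars)
-- ===== Notes on version B (the rewrite author's own statement) =====
-- stated objective: alternative
-- what changed: Replaces A's single pass with a running output index and nested conditionals by two flat passes: first collect the letter positions that consume output slots, then zip them with sentence_out and overwrite the of_interest positions in a char array (the dead isupper branch is dropped since of_interest holds only lowercase letters).
import Mathlib
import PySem

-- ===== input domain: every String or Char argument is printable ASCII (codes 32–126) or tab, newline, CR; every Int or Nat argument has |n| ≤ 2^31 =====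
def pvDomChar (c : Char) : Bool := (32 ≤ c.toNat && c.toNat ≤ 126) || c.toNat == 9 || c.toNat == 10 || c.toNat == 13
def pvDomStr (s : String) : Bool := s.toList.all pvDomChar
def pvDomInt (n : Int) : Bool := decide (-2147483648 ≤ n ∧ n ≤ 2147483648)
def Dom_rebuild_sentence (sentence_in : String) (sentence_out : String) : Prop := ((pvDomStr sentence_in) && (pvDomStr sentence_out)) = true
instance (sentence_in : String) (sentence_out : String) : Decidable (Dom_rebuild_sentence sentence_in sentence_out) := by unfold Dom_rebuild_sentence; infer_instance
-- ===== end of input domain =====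

set_option maxRecDepth 4000


-- B replaces A's single pass with a running output index by two flat passes
-- (collect letter positions, then zip with sentence_out and overwrite); return value only, no mutation.

-- ===== PORT A =====
def lettersA : List Char := [' ', '-', 'a','b','c','d','e','f','g','h','i','j','k','l',
  'm','n','o','p','q','r','s','t','u','v','w','x','y','z']

def ofInterestA : List Char := ['a', 'i', 's', 't']

-- the for-loop of A: state (index_out, sentence_rebuilt), scanning the chars of sentence_in
def rebuildGoA (outs : List Char) (len_out : Nat) : List Char → Nat → List Char → List Char
  | [], _, acc => acc
  | c :: rest, index_out, acc =>
    if PySem.Chars.lowerChar c ∈ lettersA then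
      if len_out > index_out then
        if c ∈ ofInterestA then
          if PySem.Chars.isupper c then
            rebuildGoA outs len_out rest (index_out + 1) (acc ++ [PySem.Chars.upperChar (outs.getD index_out ' ')])
          else
            rebuildGoA outs len_out rest (index_out + 1) (acc ++ [outs.getD index_out ' '])
        else
          rebuildGoA outs len_out rest (index_out + 1) (acc ++ [c])
      else rebuildGoA outs len_out rest index_out (acc ++ [c])
    else rebuildGoA outs len_out rest index_out (acc ++ [c])

def rebuild_sentence (sentence_in : String) (sentence_out : String) : String :=
  let outs := sentence_out.toList
  String.ofList (rebuildGoA outs outs.length sentence_in.toList 0 [])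

-- ===== PORT B =====
def lettersB : List Char := [' ', '-', 'a','b','c','d','e','f','g','h','i','j','k','l',
  'm','n','o','p','q','r','s','t','u','v','w','x','y','z']

def ofInterestB : List Char := ['a', 'i', 's', 't']

-- [i for i, c in enumerate(sentence_in) if c.lower() in letters]
def letterPositions : List Char → Nat → List Nat
  | [], _ => []
  | c :: cs, i =>
    if PySem.Chars.lowerChar c ∈ lettersB then i :: letterPositions cs (i + 1)
    else letterPositions cs (i + 1)

def rebuild_sentence_alt (sentence_in : String) (sentence_out : String) : String :=
  let chars := sentence_in.toList
  let final := ((letterPositions chars 0).zip sentence_out.toList).foldl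
    (fun cs po => if cs.getD po.1 ' ' ∈ ofInterestB then cs.set po.1 po.2 else cs) chars
  String.ofList final

-- ===== PRECONDITION & SPEC =====
def Spec_rebuild_sentence (sentence_in : String) (sentence_out : String) (out : String) : Prop := out = rebuild_sentence_alt sentence_in sentence_out
instance (sentence_in : String) (sentence_out : String) (out : String) : Decidable (Spec_rebuild_sentence sentence_in sentence_out out) := by unfold Spec_rebuild_sentence; infer_instance

-- ===== CLAIM (what is proved, stated in full; the proofs are below) =====
def Claim_equal_rebuild_sentence : Prop := ∀ (sentence_in : String) (sentence_out : String), Dom_rebuild_sentence sentence_in sentence_out → Spec_rebuild_sentence sentence_in sentence_out (rebuild_sentence sentence_in sentence_out)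

-- ===== LEMMAS AND PROOFS =====

-- a common middle form: structural recursion that consumes the output list
def rebuildMid : List Char → List Char → List Char
  | [], _ => []
  | c :: rest, outs =>
    if PySem.Chars.lowerChar c ∈ lettersA then
      match outs with
      | [] => c :: rebuildMid rest []
      | o :: outs' => (if c ∈ ofInterestA then o else c) :: rebuildMid rest outs'
    else c :: rebuildMid rest outs

lemma mem_ofInterest_not_upper {c : Char} (h : c ∈ ofInterestA) :
    PySem.Chars.isupper c = false := by
  simp [ofInterestA] at h
  rcases h with h | h | h | h <;> subst h <;> decide

lemma rebuildGoA_eq_mid (outs : List Char) :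
    ∀ (cs : List Char) (idx : Nat) (acc : List Char),
      rebuildGoA outs outs.length cs idx acc = acc ++ rebuildMid cs (outs.drop idx) := by
  intro cs
  induction cs with
  | nil => intro idx acc; simp [rebuildGoA, rebuildMid]
  | cons c rest ih =>
    intro idx acc
    by_cases hL : PySem.Chars.lowerChar c ∈ lettersA
    · by_cases hlt : outs.length > idx
      · have hdrop : outs.drop idx = outs.getD idx ' ' :: outs.drop (idx + 1) := by
          rw [List.getD_eq_getElem _ _ hlt]
          exact List.drop_eq_getElem_cons hlt
        by_cases hI : c ∈ ofInterestA
        · have hu := mem_ofInterest_not_upper hI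
          simp only [rebuildGoA, if_pos hL, if_pos hlt, if_pos hI, hu, Bool.false_eq_true,
            if_false]
          rw [ih]
          simp [rebuildMid, hL, hI, hdrop]
        · simp only [rebuildGoA, if_pos hL, if_pos hlt, if_neg hI]
          rw [ih]
          simp [rebuildMid, hL, hI, hdrop]
      · have hdrop : outs.drop idx = [] := by
          apply List.drop_eq_nil_of_le; omega
        simp only [rebuildGoA, if_pos hL, if_neg hlt]
        rw [ih]
        simp [rebuildMid, hL, hdrop]
    · simp only [rebuildGoA, if_neg hL]
      rw [ih]
      simp [rebuildMid, hL]

lemma rebuildMid_nil_out : ∀ cs : List Char, rebuildMid cs [] = cs := by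
  intro cs
  induction cs with
  | nil => simp [rebuildMid]
  | cons c rest ih => by_cases hL : PySem.Chars.lowerChar c ∈ lettersA <;> simp [rebuildMid, hL, ih]

lemma letterPositions_succ : ∀ (cs : List Char) (k : Nat),
    letterPositions cs (k + 1) = (letterPositions cs k).map (· + 1) := by
  intro cs
  induction cs with
  | nil => intro k; simp [letterPositions]
  | cons c rest ih =>
    intro k
    by_cases hL : PySem.Chars.lowerChar c ∈ lettersB <;> simp [letterPositions, hL, ih (k + 1)]

-- folding over shifted positions leaves the head untouched
lemma foldl_shift (c : Char) : ∀ (l : List (Nat × Char)) (cs : List Char),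
    (l.map (fun po => (po.1 + 1, po.2))).foldl
      (fun cs po => if cs.getD po.1 ' ' ∈ ofInterestB then cs.set po.1 po.2 else cs) (c :: cs)
    = c :: l.foldl (fun cs po => if cs.getD po.1 ' ' ∈ ofInterestB then cs.set po.1 po.2 else cs) cs := by
  intro l
  induction l with
  | nil => intro cs; simp
  | cons po l ih =>
    intro cs
    simp only [List.map_cons, List.foldl_cons]
    have hstep : (if (c :: cs).getD (po.1 + 1, po.2).1 ' ' ∈ ofInterestB
          then (c :: cs).set (po.1 + 1, po.2).1 (po.1 + 1, po.2).2 else (c :: cs))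
        = c :: (if cs.getD po.1 ' ' ∈ ofInterestB then cs.set po.1 po.2 else cs) := by
      dsimp only
      rw [List.getD_cons_succ, List.set_cons_succ]
      split <;> rfl
    rw [hstep, ih]

lemma zip_shift (l : List Nat) (outs : List Char) :
    (l.map (· + 1)).zip outs = (l.zip outs).map (fun po => (po.1 + 1, po.2)) := by
  rw [List.zip_map_left]
  rfl

lemma foldl_positions_eq_mid : ∀ (cs outs : List Char),
    ((letterPositions cs 0).zip outs).foldl
      (fun cs po => if cs.getD po.1 ' ' ∈ ofInterestB then cs.set po.1 po.2 else cs) cs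
    = rebuildMid cs outs := by
  intro cs
  induction cs with
  | nil => intro outs; simp [letterPositions, rebuildMid]
  | cons c rest ih =>
    intro outs
    have hshift := letterPositions_succ rest 0
    by_cases hL : PySem.Chars.lowerChar c ∈ lettersB
    · have hL' : PySem.Chars.lowerChar c ∈ lettersA := hL
      cases outs with
      | nil => simp [letterPositions, hL, rebuildMid, hL', rebuildMid_nil_out]
      | cons o outs' =>
        simp only [letterPositions, if_pos hL, hshift, List.zip_cons_cons, List.foldl_cons,
          zip_shift]
        have h0 : (if (c :: rest).getD ((0 : Nat), o).1 ' ' ∈ ofInterestB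
              then (c :: rest).set ((0 : Nat), o).1 ((0 : Nat), o).2 else (c :: rest))
            = (if c ∈ ofInterestB then o else c) :: rest := by
          by_cases hI : c ∈ ofInterestB <;> simp [hI]
        rw [h0, foldl_shift, ih]
        by_cases hI : c ∈ ofInterestB
        · simp [rebuildMid, hL', hI, show c ∈ ofInterestA from hI]
        · simp [rebuildMid, hL', hI, show c ∉ ofInterestA from hI]
    · have hL' : PySem.Chars.lowerChar c ∉ lettersA := hL
      simp only [letterPositions, if_neg hL, hshift, zip_shift]
      rw [foldl_shift, ih]
      simp [rebuildMid, hL']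

-- ===== VERDICT (by name: the statement is the Claim_ definition above) =====
theorem rebuild_sentence_spec : Claim_equal_rebuild_sentence := by
  intro sin sout _
  show String.ofList (rebuildGoA sout.toList sout.toList.length sin.toList 0 [])
      = String.ofList (((letterPositions sin.toList 0).zip sout.toList).foldl
          (fun cs po => if cs.getD po.1 ' ' ∈ ofInterestB then cs.set po.1 po.2 else cs)
          sin.toList)
  rw [rebuildGoA_eq_mid, foldl_positions_eq_mid]
  simp
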